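-- pv_equiv track=rewrite | github.com/MattVerwey/TopDeck | src/topdeck/reporting/service.py | _generate_deployments_overview
-- ===== SOURCE A (Python) =====
-- from typing import Any
--
-- def _generate_deployments_overview(deployments: list[dict[str, Any]]) -> str:
--     """Generate deployments overview text."""
--     if not deployments:
--         return "No deployments found in the specified time range."
--
--     summary = f"**Total Deployments**: {len(deployments)}\n\n"
--
--     status_counts: dict[str, int] = {}
--     for deployment in deployments:
--         status = deployment.get("status", "unknown")
--         status_counts[status] = status_counts.get(status, 0) + 1
--
--     summary += "**By Status**:\n"
--     for status, count in sorted(status_counts.items()):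
--         summary += f"- {status.title()}: {count}\n"
--
--     return summary
-- ===== SOURCE B (Python) =====
-- def _generate_deployments_overview(deployments):
--     """Generate deployments overview text (sort + run-length groups instead of a counting dict)."""
--     if not deployments:
--         return "No deployments found in the specified time range."
--     lines = [f"**Total Deployments**: {len(deployments)}\n\n", "**By Status**:\n"]
--     statuses = sorted(d.get("status", "unknown") for d in deployments)
--     n = len(statuses)
--     i = 0
--     while i < n:
--         j = i
--         while j < n and statuses[j] == statuses[i]:
--             j += 1
--         lines.append(f"- {statuses[i].title()}: {j - i}\n")
--         i = j
--     return "".join(lines)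
-- ===== Notes on version B (the rewrite author's own statement) =====
-- stated objective: alternative
-- what changed: Replaces A's status->count dict (built in a pass, then sorted by key) with sorting the status strings themselves and emitting one line per run of equal statuses via a run-length walk.
import Mathlib
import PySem

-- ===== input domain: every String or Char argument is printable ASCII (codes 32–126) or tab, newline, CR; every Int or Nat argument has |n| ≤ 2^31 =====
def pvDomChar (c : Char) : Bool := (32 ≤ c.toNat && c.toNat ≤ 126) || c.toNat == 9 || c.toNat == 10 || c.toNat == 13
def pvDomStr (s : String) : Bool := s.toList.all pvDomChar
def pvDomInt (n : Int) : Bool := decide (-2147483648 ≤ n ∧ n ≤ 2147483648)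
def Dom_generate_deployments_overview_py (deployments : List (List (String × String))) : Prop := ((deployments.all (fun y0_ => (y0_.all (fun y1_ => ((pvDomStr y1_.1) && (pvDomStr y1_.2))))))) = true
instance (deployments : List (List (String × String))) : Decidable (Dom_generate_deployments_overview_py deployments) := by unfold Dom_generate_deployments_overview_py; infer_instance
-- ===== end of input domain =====

-- B replaces A's status->count dict (built in one pass, then sorted) by sorting the status
-- strings themselves and emitting one line per run of equal statuses; same output, a
-- different decomposition (alternative, not claimed faster).

-- shared helpers (both Pythons use the same expressions) ------------------------------
-- str.title(): hand port, exact on ASCII (where 'cased' = isalpha); a letter after a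
-- non-cased character is uppercased, after a cased one lowercased.
def pyTitleGo : Bool → List Char → List Char
  | _, [] => []
  | prev, c :: cs =>
      (if PySem.Chars.isalpha c then
        (if prev then PySem.Chars.lowerChar c else PySem.Chars.upperChar c)
       else c) :: pyTitleGo (PySem.Chars.isalpha c) cs

def pyTitle (s : String) : String := String.ofList (pyTitleGo false s.toList)

-- deployment.get("status", "unknown") (assoc-list dict, first match per the type convention)
def getStatus (d : List (String × String)) : String := (d.lookup "status").getD "unknown"

-- f"- {status.title()}: {count}\n"
def lineOf (p : String × Int) : String := "- " ++ pyTitle p.1 ++ ": " ++ PySem.Int.toStr p.2 ++ "\n"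

-- ===== PORT A =====
def generate_deployments_overview_py (deployments : List (List (String × String))) : String :=
  if deployments = [] then
    "No deployments found in the specified time range."
  else
    let summary := "**Total Deployments**: " ++ PySem.Int.toStr (deployments.length : Int) ++ "\n\n"
    let status_counts : PySem.Dict String Int :=
      deployments.foldl
        (fun d deployment =>
          let status := getStatus deployment
          d.insert status (d.getD status 0 + 1))
        PySem.Dict.empty
    let summary := summary ++ "**By Status**:\n"
    (PySem.List.sorted2 status_counts.items (fun p => p.1) (fun p => p.2) false).foldl
      (fun s p => s ++ lineOf p) summary

-- ===== PORT B =====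
-- the run-length walk of Source B's while loop over the sorted status list: each step takes
-- one maximal run (j - i = length of the run of statuses equal to statuses[i])
def runsB : List String → List (String × Int)
  | [] => []
  | s :: rest =>
      (s, 1 + ((rest.takeWhile (fun t => t == s)).length : Int))
        :: runsB (rest.dropWhile (fun t => t == s))
  termination_by l => l.length
  decreasing_by
    simpa using Nat.lt_succ_of_le (List.length_dropWhile_le _ _)

def generate_deployments_overview_py_alt (deployments : List (List (String × String))) : String :=
  if deployments = [] then
    "No deployments found in the specified time range."
  else
    let lines : List String :=
      ["**Total Deployments**: " ++ PySem.Int.toStr (deployments.length : Int) ++ "\n\n",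
       "**By Status**:\n"]
    let statuses := PySem.List.sorted (deployments.map getStatus) (fun s => s) false
    PySem.Str.join "" (lines ++ (runsB statuses).map lineOf)

-- ===== PRECONDITION & SPEC =====
def Spec_generate_deployments_overview_py (deployments : List (List (String × String))) (out : String) : Prop := out = generate_deployments_overview_py_alt deployments
instance (deployments : List (List (String × String))) (out : String) : Decidable (Spec_generate_deployments_overview_py deployments out) := by unfold Spec_generate_deployments_overview_py; infer_instance

-- ===== CLAIM (what is proved, stated in full; the proofs are below) =====
def Claim_equal_generate_deployments_overview_py : Prop := ∀ (deployments : List (List (String × String))), Dom_generate_deployments_overview_py deployments → Spec_generate_deployments_overview_py deployments (generate_deployments_overview_py deployments)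

-- ===== LEMMAS AND PROOFS =====

-- insertBy only looks at `before` on (x, element of ys)
theorem insertBy_congr {α : Type} (b1 b2 : α → α → Bool) (x : α) (ys : List α)
    (h : ∀ y ∈ ys, b1 x y = b2 x y) :
    PySem.List.insertBy b1 x ys = PySem.List.insertBy b2 x ys := by
  induction ys with
  | nil => simp [PySem.List.insertBy]
  | cons y ys ih =>
      simp only [PySem.List.insertBy]
      rw [h y (List.mem_cons_self ..)]
      split
      · rfl
      · rw [ih (fun z hz => h z (List.mem_cons_of_mem _ hz))]

theorem foldl_insertBy_congr {α : Type} (b1 b2 : α → α → Bool) (m : List α)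
    (hagree : ∀ a ∈ m, ∀ b ∈ m, b1 a b = b2 a b) :
    ∀ (xs acc : List α), (∀ x ∈ xs, x ∈ m) → (∀ y ∈ acc, y ∈ m) →
      xs.foldl (fun acc x => PySem.List.insertBy b1 x acc) acc
        = xs.foldl (fun acc x => PySem.List.insertBy b2 x acc) acc := by
  intro xs
  induction xs with
  | nil => intro acc _ _; rfl
  | cons x xs ih =>
      intro acc hxs hacc
      have hx : x ∈ m := hxs x (List.mem_cons_self ..)
      simp only [List.foldl_cons]
      rw [insertBy_congr b1 b2 x acc (fun y hy => hagree x hx y (hacc y hy))]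
      exact ih _ (fun z hz => hxs z (List.mem_cons_of_mem _ hz))
        (fun y hy => by
          rcases (PySem.List.mem_insertBy _ _ _ _).mp hy with h | h
          · exact h ▸ hx
          · exact hacc y h)

-- with pairwise-distinct first components, Python's tuple sort is the sort by first key
theorem sorted2_eq_sorted_fst (xs : List (String × Int))
    (hnd : (xs.map Prod.fst).Nodup) :
    PySem.List.sorted2 xs (fun p => p.1) (fun p => p.2) false
      = PySem.List.sorted xs (fun p => p.1) false := by
  rw [PySem.List.sorted_eq_foldl_insertBy]
  show xs.foldl (fun acc x => PySem.List.insertBy _ x acc) [] = _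
  refine foldl_insertBy_congr _ _ xs ?_ xs [] (fun x hx => hx) (fun y hy => absurd hy (List.not_mem_nil))
  intro a ha b hb
  rcases lt_trichotomy a.1 b.1 with h | h | h
  · simp [h, asymm h]
  · have hab : a = b := List.inj_on_of_nodup_map hnd ha hb h
    subst hab
    simp
  · simp [h, asymm h]

-- characterisation of the run-length walk on a sorted list
theorem runsB_spec : ∀ (S : List String), S.Pairwise (· ≤ ·) →
    (∀ p : String × Int, p ∈ runsB S ↔ (p.1 ∈ S ∧ p.2 = (S.count p.1 : Int)))
    ∧ ((runsB S).map Prod.fst).Nodup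
    ∧ (runsB S).Pairwise (fun a b => a.1 < b.1) := by
  intro S
  induction S using runsB.induct with
  | case1 => intro _; refine ⟨by simp [runsB], by simp [runsB], by simp [runsB]⟩
  | case2 s rest ih =>
      intro hp
      obtain ⟨hs, hrest⟩ := List.pairwise_cons.mp hp
      have hrest' : (rest.dropWhile (fun t => t == s)).Pairwise (· ≤ ·) :=
        hrest.sublist (List.dropWhile_sublist _)
      have hrunmem : ∀ t ∈ rest.takeWhile (fun t => t == s), t = s := by
        intro t ht
        exact eq_of_beq (List.mem_takeWhile_imp (p := fun t => t == s) ht)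
      have hlt : ∀ t ∈ rest.dropWhile (fun t => t == s), s < t := by
        cases hre : rest.dropWhile (fun t => t == s) with
        | nil => simp
        | cons h tl =>
            have hh : ((fun t => t == s) h) = false := by
              have := List.head_dropWhile_not (fun t => t == s) (l := rest) (by simp [hre])
              simpa [hre] using this
            have hhne : h ≠ s := by simpa using hh
            have hhmem : h ∈ rest := (List.dropWhile_sublist _).subset (hre ▸ List.mem_cons_self ..)
            have hsh : s < h := lt_of_le_of_ne (hs h hhmem) (Ne.symm hhne)
            intro t htmem
            rcases List.mem_cons.mp htmem with rfl | htl
            · exact hsh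
            · have : h ≤ t := (List.pairwise_cons.mp (hre ▸ hrest')).1 t htl
              exact lt_of_lt_of_le hsh this
      have hsplit : rest.takeWhile (fun t => t == s) ++ rest.dropWhile (fun t => t == s) = rest :=
        List.takeWhile_append_dropWhile
      have hcount_run : (rest.takeWhile (fun t => t == s)).count s
          = (rest.takeWhile (fun t => t == s)).length :=
        List.count_eq_length.mpr (fun b hb => (hrunmem b hb).symm)
      have hcount_rest'0 : (rest.dropWhile (fun t => t == s)).count s = 0 :=
        List.count_eq_zero.mpr (fun hm => lt_irrefl s (hlt s hm))
      have hcount_s : (s :: rest).count s = (rest.takeWhile (fun t => t == s)).length + 1 := by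
        rw [List.count_cons_self]
        conv_lhs => rw [← hsplit]
        rw [List.count_append, hcount_run, hcount_rest'0]
      have hcount_ne : ∀ t, t ≠ s →
          (s :: rest).count t = (rest.dropWhile (fun t => t == s)).count t := by
        intro t hne
        have hrun0 : (rest.takeWhile (fun t => t == s)).count t = 0 :=
          List.count_eq_zero.mpr (fun hm => hne (hrunmem t hm))
        rw [show List.count t (s :: rest) = List.count t rest from by
          simp [List.count_cons, Ne.symm hne]]
        conv_lhs => rw [← hsplit]
        rw [List.count_append, hrun0, Nat.zero_add]
      obtain ⟨ihmem, ihnd, ihpw⟩ := ih hrest'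
      have hmem' : ∀ p : String × Int,
          p ∈ runsB (s :: rest) ↔ (p.1 ∈ s :: rest ∧ p.2 = ((s :: rest).count p.1 : Int)) := by
        intro p
        rw [show runsB (s :: rest)
            = (s, 1 + ((rest.takeWhile (fun t => t == s)).length : Int))
              :: runsB (rest.dropWhile (fun t => t == s)) from by rw [runsB]]
        constructor
        · intro hp'
          rcases List.mem_cons.mp hp' with rfl | hmem2
          · refine ⟨List.mem_cons_self .., ?_⟩
            simp only [hcount_s]
            push_cast
            ring
          · obtain ⟨h1, h2⟩ := (ihmem p).mp hmem2
            have hne : p.1 ≠ s := (hlt _ h1).ne'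
            refine ⟨List.mem_cons_of_mem _ ((List.dropWhile_sublist _).subset h1), ?_⟩
            rw [hcount_ne p.1 hne]
            exact h2
        · rintro ⟨h1, h2⟩
          by_cases hps : p.1 = s
          · refine List.mem_cons.mpr (Or.inl ?_)
            have hval : p.2 = 1 + ((rest.takeWhile (fun t => t == s)).length : Int) := by
              rw [h2, hps, hcount_s]
              push_cast
              ring
            calc p = (p.1, p.2) := rfl
              _ = _ := by rw [hps, hval]
          · refine List.mem_cons.mpr (Or.inr ?_)
            have h1' : p.1 ∈ rest := by
              rcases List.mem_cons.mp h1 with h | h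
              · exact absurd h hps
              · exact h
            have h1'' : p.1 ∈ rest.dropWhile (fun t => t == s) := by
              rcases List.mem_append.mp (hsplit ▸ h1') with h | h
              · exact absurd (hrunmem _ h) hps
              · exact h
            exact (ihmem p).mpr ⟨h1'', by rw [h2, hcount_ne p.1 hps]⟩
      refine ⟨hmem', ?_, ?_⟩
      · rw [show runsB (s :: rest)
            = (s, 1 + ((rest.takeWhile (fun t => t == s)).length : Int))
              :: runsB (rest.dropWhile (fun t => t == s)) from by rw [runsB]]
        simp only [List.map_cons, List.nodup_cons]
        refine ⟨?_, ihnd⟩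
        intro hmem2
        obtain ⟨p, hp2, hp1⟩ := List.mem_map.mp hmem2
        have := ((ihmem p).mp hp2).1
        exact lt_irrefl s (hp1 ▸ hlt _ this)
      · rw [show runsB (s :: rest)
            = (s, 1 + ((rest.takeWhile (fun t => t == s)).length : Int))
              :: runsB (rest.dropWhile (fun t => t == s)) from by rw [runsB]]
        refine List.pairwise_cons.mpr ⟨?_, ihpw⟩
        intro b hb
        exact hlt _ ((ihmem b).mp hb).1

-- A's sorted dict items are exactly the runs of the sorted status list
theorem sorted2_counter_eq_runsB (l : List String) :
    PySem.List.sorted2 (PySem.Dict.counter l).items (fun p => p.1) (fun p => p.2) false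
      = runsB (PySem.List.sorted l (fun s => s) false) := by
  have hp : (PySem.List.sorted l (fun s => s) false).Pairwise (· ≤ ·) :=
    PySem.List.sorted_pairwise l (fun s => s)
  obtain ⟨hmem, hnd, hpw⟩ := runsB_spec _ hp
  have hSperm : (PySem.List.sorted l (fun s => s) false).Perm l :=
    PySem.List.sorted_perm l (fun s => s) false
  have hxs_fst : ((PySem.Dict.counter l).items.map Prod.fst).Nodup := by
    have h := PySem.Dict.nodup_keys_counter l
    simpa [PySem.Dict.keys] using h
  rw [sorted2_eq_sorted_fst _ hxs_fst]
  apply PySem.List.sorted_eq_of_perm_of_pairwise_lt _ _ _ ?_ hpw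
  rw [List.perm_ext_iff_of_nodup (List.Nodup.of_map _ hnd) (List.Nodup.of_map _ hxs_fst)]
  intro p
  rw [hmem p, PySem.Dict.items_counter]
  constructor
  · rintro ⟨h1, h2⟩
    refine List.mem_map.mpr ⟨p.1, (PySem.Set.mem_ofList _ _).mpr (hSperm.subset h1), ?_⟩
    have hc : (PySem.List.sorted l (fun s => s) false).count p.1 = l.count p.1 :=
        hSperm.count_eq p.1
    calc (p.1, (l.count p.1 : Int)) = (p.1, ((PySem.List.sorted l (fun s => s) false).count p.1 : Int)) := by rw [hc]
      _ = (p.1, p.2) := by rw [← h2]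
      _ = p := rfl
  · intro hp'
    obtain ⟨k, hk, hkp⟩ := List.mem_map.mp hp'
    have hk' : k ∈ l := (PySem.Set.mem_ofList _ _).mp hk
    have hp1 : p.1 = k := by rw [← hkp]
    have hp2 : p.2 = (l.count k : Int) := by rw [← hkp]
    refine ⟨?_, ?_⟩
    · rw [hp1]; exact hSperm.mem_iff.mpr hk'
    · rw [hp2, hp1, hSperm.count_eq]

theorem chars_join_nil (css : List (List Char)) : PySem.Chars.join [] css = css.flatten := by
  induction css with
  | nil => simpa using PySem.Chars.join_nil []
  | cons c cs ih =>
      cases cs with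
      | nil => simpa using PySem.Chars.join_singleton [] c
      | cons q rest =>
          rw [PySem.Chars.join_cons_cons, ih]
          simp

theorem toList_foldl_strcat {α : Type} (f : α → String) (L : List α) :
    ∀ init : String,
      (L.foldl (fun s p => s ++ f p) init).toList
        = init.toList ++ (L.map (fun p => (f p).toList)).flatten := by
  induction L with
  | nil => intro init; simp
  | cons a L ih =>
      intro init
      simp only [List.foldl_cons, List.map_cons, List.flatten_cons]
      rw [ih (init ++ f a)]
      simp [String.toList_append]

theorem toList_join_empty (parts : List String) :
    (PySem.Str.join "" parts).toList = (parts.map String.toList).flatten := by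
  rw [PySem.Str.toList_join]
  have h : ("" : String).toList = [] := rfl
  rw [h, chars_join_nil]

-- ===== VERDICT (by name: the statement is the Claim_ definition above) =====
theorem generate_deployments_overview_py_spec : Claim_equal_generate_deployments_overview_py := by
  intro deployments _
  unfold Spec_generate_deployments_overview_py generate_deployments_overview_py generate_deployments_overview_py_alt
  by_cases hnil : deployments = []
  · simp [hnil]
  · simp only [if_neg hnil]
    have hdict :
        deployments.foldl
          (fun d deployment =>
            let status := getStatus deployment
            d.insert status (d.getD status 0 + 1))
          PySem.Dict.empty
        = PySem.Dict.counter (deployments.map getStatus) := by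
      rw [← PySem.Dict.foldl_insert_getD_add_one_eq_counter, List.foldl_map]
    rw [hdict, sorted2_counter_eq_runsB]
    apply String.toList_inj.mp
    rw [toList_foldl_strcat, toList_join_empty]
    simp [String.toList_append, List.map_map, Function.comp_def]
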